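-- pv_equiv track=rewrite | github.com/LionPKH/testbioMed | master.py | _extract_data_sections
-- ===== SOURCE A (Python) =====
-- from typing import List, Dict, Optional, Tuple
--
-- def _extract_data_sections(lines: List[str]) -> List[str]:
--     """Извлечение секций обработки данных из кода"""
--     # Упрощенная реализация - в реальной системе здесь был бы парсинг AST
--     sections = []
--     current_section = []
--
--     for line in lines:
--         if line.strip().startswith('def ') and current_section:
--             sections.append('\n'.join(current_section))
--             current_section = []
--         current_section.append(line)
--
--     if current_section:
--         sections.append('\n'.join(current_section))
--
--     return sections if sections else ['\n'.join(lines)]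
-- ===== SOURCE B (Python) =====
-- from typing import List
--
--
-- def _extract_data_sections(lines: List[str]) -> List[str]:
--     """Split lines into chunks that start at 'def ' boundaries, by recursive span/slice
--     instead of an accumulate-and-flush state machine."""
--     def split_chunks(ls):
--         if not ls:
--             return []
--         tail = ls[1:]
--         k = 0
--         while k < len(tail) and not tail[k].strip().startswith('def '):
--             k += 1
--         return [ls[0:k + 1]] + split_chunks(tail[k:])
--     if not lines:
--         return ['']
--     return ['\n'.join(c) for c in split_chunks(lines)]
-- ===== Notes on version B (the rewrite author's own statement) =====
-- stated objective: alternative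
-- what changed: Replaces A's accumulate-and-flush state machine (mutable current_section with a final flush and empty-result fallback) by a recursive span/slice decomposition: each chunk is the head line plus the run of non-def lines after it, with the empty-input case (['']) handled explicitly.
import Mathlib
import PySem

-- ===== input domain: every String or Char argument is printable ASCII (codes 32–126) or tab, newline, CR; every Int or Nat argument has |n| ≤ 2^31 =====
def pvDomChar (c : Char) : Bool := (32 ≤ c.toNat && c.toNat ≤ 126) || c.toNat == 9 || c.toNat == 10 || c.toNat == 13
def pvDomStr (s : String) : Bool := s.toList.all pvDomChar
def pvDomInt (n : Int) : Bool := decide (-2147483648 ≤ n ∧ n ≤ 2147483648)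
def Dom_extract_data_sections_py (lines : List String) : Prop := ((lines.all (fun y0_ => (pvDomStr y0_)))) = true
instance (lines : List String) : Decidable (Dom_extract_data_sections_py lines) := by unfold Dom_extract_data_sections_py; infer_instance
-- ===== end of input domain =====

-- B replaces A's accumulate-and-flush state machine by a recursive span/slice chunking
-- (objective: alternative decomposition, same O(n) cost).

-- shared predicate: line.strip().startswith('def ')
def pvIsDef (line : String) : Bool :=
  PySem.Str.startswith (PySem.Str.strip line) "def "

-- ===== PORT A =====
def extract_data_sections_py (lines : List String) : List String :=
  let st := lines.foldl
    (fun (st : List String × List String) line =>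
      let (sections, cur) := st
      if pvIsDef line && !cur.isEmpty then
        (sections ++ [PySem.Str.join "\n" cur], [line])
      else
        (sections, cur ++ [line]))
    ([], [])
  let sections := if st.2.isEmpty then st.1 else st.1 ++ [PySem.Str.join "\n" st.2]
  if sections.isEmpty then [PySem.Str.join "\n" lines] else sections

-- ===== PORT B =====
-- split_chunks: the head line plus the run of following non-def lines, then recurse on the rest
def pvSplitChunks (ls : List String) : List (List String) :=
  match ls with
  | [] => []
  | l :: tail =>
    let pre := tail.takeWhile (fun x => !pvIsDef x)
    (l :: pre) :: pvSplitChunks (tail.drop pre.length)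
termination_by ls.length
decreasing_by
  simp only [List.length_cons, List.length_drop]
  omega

def extract_data_sections_py_alt (lines : List String) : List String :=
  if lines.isEmpty then [""]
  else (pvSplitChunks lines).map (PySem.Str.join "\n")

-- ===== PRECONDITION & SPEC =====
def Spec_extract_data_sections_py (lines : List String) (out : List String) : Prop := out = extract_data_sections_py_alt lines
instance (lines : List String) (out : List String) : Decidable (Spec_extract_data_sections_py lines out) := by unfold Spec_extract_data_sections_py; infer_instance

-- ===== CLAIM (what is proved, stated in full; the proofs are below) =====
def Claim_equal_extract_data_sections_py : Prop := ∀ (lines : List String), Dom_extract_data_sections_py lines → Spec_extract_data_sections_py lines (extract_data_sections_py lines)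

-- ===== LEMMAS AND PROOFS =====

-- common intermediate form of both programs on a nonempty input
def pvGo (cur : List String) (rest : List String) : List String :=
  match rest with
  | [] => [PySem.Str.join "\n" cur]
  | x :: r =>
    if pvIsDef x then PySem.Str.join "\n" cur :: pvGo [x] r
    else pvGo (cur ++ [x]) r

def pvStep (st : List String × List String) (line : String) : List String × List String :=
  let (sections, cur) := st
  if pvIsDef line && !cur.isEmpty then
    (sections ++ [PySem.Str.join "\n" cur], [line])
  else
    (sections, cur ++ [line])

lemma pvGo_ne_nil (cur rest : List String) : pvGo cur rest ≠ [] := by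
  induction rest generalizing cur with
  | nil => simp [pvGo]
  | cons x r ih =>
    simp only [pvGo]
    split
    · simp
    · exact ih _

-- A's loop, started with a nonempty current section, computes pvGo
lemma pvFoldA (rest : List String) : ∀ (secs cur : List String), cur ≠ [] →
    (if (rest.foldl pvStep (secs, cur)).2.isEmpty then (rest.foldl pvStep (secs, cur)).1
     else (rest.foldl pvStep (secs, cur)).1 ++ [PySem.Str.join "\n" (rest.foldl pvStep (secs, cur)).2])
      = secs ++ pvGo cur rest := by
  induction rest with
  | nil =>
    intro secs cur h
    have hne : cur.isEmpty = false := by simp [h]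
    simp only [List.foldl_nil]
    show (if cur.isEmpty = true then secs else secs ++ [PySem.Str.join "\n" cur]) = secs ++ pvGo cur []
    rw [hne]
    simp only [Bool.false_eq_true, if_false, pvGo]
  | cons x r ih =>
    intro secs cur h
    rw [List.foldl_cons]
    by_cases hd : pvIsDef x
    · have hne : cur.isEmpty = false := by simp [h]
      have h1 : pvStep (secs, cur) x = (secs ++ [PySem.Str.join "\n" cur], [x]) := by
        simp [pvStep, hd, h]
      rw [h1, ih _ [x] (by simp)]
      rw [show pvGo cur (x :: r) = PySem.Str.join "\n" cur :: pvGo [x] r from by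
        simp only [pvGo, if_pos hd]]
      simp
    · have h1 : pvStep (secs, cur) x = (secs, cur ++ [x]) := by
        simp [pvStep, hd]
      rw [h1, ih _ (cur ++ [x]) (by simp)]
      rw [show pvGo cur (x :: r) = pvGo (cur ++ [x]) r from by
        simp only [pvGo, if_neg hd]]

-- pvGo computes B's span chunks
lemma pvGo_eq_chunks (rest : List String) : ∀ (cur : List String),
    pvGo cur rest =
      PySem.Str.join "\n" (cur ++ rest.takeWhile (fun x => !pvIsDef x)) ::
        (pvSplitChunks (rest.drop (rest.takeWhile (fun x => !pvIsDef x)).length)).map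
          (PySem.Str.join "\n") := by
  induction rest with
  | nil => intro cur; simp [pvGo, pvSplitChunks]
  | cons x r ih =>
    intro cur
    by_cases hd : pvIsDef x
    · simp only [pvGo, List.takeWhile_cons, hd, Bool.not_true]
      rw [ih [x]]
      simp [pvSplitChunks]
    · simp only [pvGo, List.takeWhile_cons, hd, Bool.not_false]
      rw [ih (cur ++ [x])]
      simp

-- ===== VERDICT (by name: the statement is the Claim_ definition above) =====
theorem extract_data_sections_py_spec : Claim_equal_extract_data_sections_py := by
  intro lines _
  unfold Spec_extract_data_sections_py
  cases lines with
  | nil => simp [extract_data_sections_py, extract_data_sections_py_alt, PySem.Str.join]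
  | cons l ls =>
    unfold extract_data_sections_py
    have h0 : (fun (st : List String × List String) line =>
        let (sections, cur) := st
        if pvIsDef line && !cur.isEmpty then
          (sections ++ [PySem.Str.join "\n" cur], [line])
        else (sections, cur ++ [line])) = pvStep := rfl
    rw [h0]
    have h2 : (l :: ls).foldl pvStep ([], []) = ls.foldl pvStep ([], [l]) := by
      rw [List.foldl_cons]
      have : pvStep ([], []) l = ([], [l]) := by simp [pvStep]
      rw [this]
    simp only [h2]
    rw [pvFoldA ls [] [l] (by simp)]
    simp only [List.nil_append]
    have hne : (pvGo [l] ls).isEmpty = false := by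
      simp [pvGo_ne_nil]
    rw [hne]
    simp only [Bool.false_eq_true, if_false]
    rw [pvGo_eq_chunks ls [l]]
    unfold extract_data_sections_py_alt
    simp only [List.isEmpty_cons, Bool.false_eq_true, if_false]
    rw [show pvSplitChunks (l :: ls) =
        (l :: ls.takeWhile (fun x => !pvIsDef x)) ::
          pvSplitChunks (ls.drop (ls.takeWhile (fun x => !pvIsDef x)).length) from by
      rw [pvSplitChunks]]
    simp
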